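-- pv_equiv track=rewrite | github.com/sp863/algorithm_python | programmers/lvl_1/71_햄버거만들기*/71_햄버거만들기*.py | solution
-- ===== SOURCE A (Python) =====
-- def solution(ingredient):
--     s = []
--     cnt = 0
--     for i in ingredient:
--         s.append(i)
--         if s[-4:] == [1, 2, 3, 1]:
--             cnt += 1
--             s = s[:-4]  # 해당 부분으로 인해 시간 초과 발생
--     return cnt
-- ===== SOURCE B (Python) =====
-- def solution(ingredient):
--     # KMP-style match-length automaton for the pattern 1,2,3,1: keep a stack of
--     # automaton STATES (not ingredients); a completed match pops its 3 pushed
--     # states, resuming at the state that was current before the pattern began.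
--     # O(n): each element pushes/pops at most one state.
--     cnt = 0
--     st = [0]  # st[-1] = how many characters of 1,2,3,1 are currently matched
--     for x in ingredient:
--         q = st[-1]
--         if x == 1:
--             nq = q + 1 if (q == 0 or q == 3) else 1
--         elif x == 2 and q == 1:
--             nq = 2
--         elif x == 3 and q == 2:
--             nq = 3
--         else:
--             nq = 0
--         if nq == 4:
--             cnt += 1
--             del st[-3:]
--         else:
--             st.append(nq)
--     return cnt
-- ===== Notes on version B (the rewrite author's own statement) =====
-- stated objective: faster
-- what changed: B replaces A's ingredient stack (4-element slice comparison and s[:-4] list rebuild per step) with a KMP-style match-length automaton for the pattern 1,2,3,1, keeping a stack of automaton states and popping three states on each completed match.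
import Mathlib
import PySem

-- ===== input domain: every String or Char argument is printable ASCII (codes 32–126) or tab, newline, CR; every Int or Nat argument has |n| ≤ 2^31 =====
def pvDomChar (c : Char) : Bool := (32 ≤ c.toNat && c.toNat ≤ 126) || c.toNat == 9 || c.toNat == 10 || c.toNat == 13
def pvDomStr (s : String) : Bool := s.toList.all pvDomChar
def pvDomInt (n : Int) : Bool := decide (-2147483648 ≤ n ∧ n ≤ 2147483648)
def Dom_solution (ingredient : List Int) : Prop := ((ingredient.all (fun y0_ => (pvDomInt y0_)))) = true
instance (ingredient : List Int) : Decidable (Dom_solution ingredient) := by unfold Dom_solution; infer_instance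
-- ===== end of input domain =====

-- B replaces A's ingredient stack with 4-slice comparison and s[:-4] rebuilds by a
-- KMP-style match-length automaton over 1,2,3,1 keeping a stack of automaton states (faster).

-- ===== PORT A =====
-- state: (s, cnt); s in Python list order
def solStepA (st : List Int × Int) (i : Int) : List Int × Int :=
  let s := st.1 ++ [i]
  if PySem.List.slice s (some (-4)) none == [1, 2, 3, 1] then
    (PySem.List.slice s none (some (-4)), st.2 + 1)
  else
    (s, st.2)

def solution (ingredient : List Int) : Int :=
  (ingredient.foldl solStepA ([], 0)).2

-- ===== PORT B =====
-- the automaton transition of Source B (nq from q = st[-1] and x)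
def mstep (q x : Int) : Int :=
  if x == 1 then (if q == 0 || q == 3 then q + 1 else 1)
  else if x == 2 && q == 1 then 2
  else if x == 3 && q == 2 then 3
  else 0

-- state: (st, cnt); st is Source B's state stack TOP-FIRST (head = Python st[-1]);
-- st starts as [0] and is never empty, so headI is exact for st[-1].
def solStepB (st : List Int × Int) (x : Int) : List Int × Int :=
  let nq := mstep st.1.headI x
  if nq == 4 then (st.1.drop 3, st.2 + 1) else (nq :: st.1, st.2)

def solution_alt (ingredient : List Int) : Int :=
  (ingredient.foldl solStepB ([0], 0)).2

-- ===== PRECONDITION & SPEC =====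
def Spec_solution (ingredient : List Int) (out : Int) : Prop := out = solution_alt ingredient
instance (ingredient : List Int) (out : Int) : Decidable (Spec_solution ingredient out) := by unfold Spec_solution; infer_instance

-- ===== CLAIM (what is proved, stated in full; the proofs are below) =====
def Claim_equal_solution : Prop := ∀ (ingredient : List Int), Dom_solution ingredient → Spec_solution ingredient (solution ingredient)

-- ===== LEMMAS AND PROOFS =====

-- match length of the reversed stack: longest suffix of the stack that is a
-- proper prefix of [1,2,3,1] (argument r is the stack reversed, top first)
def mL (r : List Int) : Int :=
  if r.take 3 = [3, 2, 1] then 3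
  else if r.take 2 = [2, 1] then 2
  else if r.take 1 = [1] then 1
  else 0

-- B's state stack as a function of A's stack s (Python order), top first
def stOf (s : List Int) : List Int :=
  s.foldl (fun acc x => mstep acc.headI x :: acc) [0]

-- A's stack never contains 1,2,3,1 contiguously
def NoOcc (s : List Int) : Prop := ¬ [1, 2, 3, 1] <:+: s

lemma stOf_append (s : List Int) (x : Int) :
    stOf (s ++ [x]) = mstep (stOf s).headI x :: stOf s := by
  simp [stOf, List.foldl_append]

lemma take3_pat (r : List Int) : r.take 3 = [3, 2, 1] ↔ ∃ r', r = 3 :: 2 :: 1 :: r' := by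
  rcases r with _ | ⟨a, _ | ⟨b, _ | ⟨c, r⟩⟩⟩ <;> simp

lemma mL_three (r : List Int) : mL r = 3 ↔ ∃ r', r = 3 :: 2 :: 1 :: r' := by
  unfold mL
  rw [← take3_pat]
  split_ifs with h1 h2 h3 <;> simp_all

lemma mL_eq_one_iff (r : List Int) : mL r = 1 ↔ r.take 1 = [1] := by
  unfold mL
  rcases r with _ | ⟨a, r⟩ <;> simp only [List.take] <;> split_ifs <;> simp_all

lemma mL_eq_two_iff (r : List Int) : mL r = 2 ↔ r.take 2 = [2, 1] := by
  unfold mL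
  rcases r with _ | ⟨a, _ | ⟨b, r⟩⟩ <;> simp only [List.take] <;> split_ifs <;> simp_all

lemma mL_range (r : List Int) : mL r = 0 ∨ mL r = 1 ∨ mL r = 2 ∨ mL r = 3 := by
  unfold mL; split_ifs <;> simp

lemma matchLen_cons (r : List Int) (x : Int) (h : ¬ (mL r = 3 ∧ x = 1)) :
    mstep (mL r) x = mL (x :: r) := by
  by_cases hx1 : x = 1
  · subst hx1
    have h1 : mL (1 :: r) = 1 := by rw [mL_eq_one_iff]; simp [List.take]
    rw [h1]
    have h3 : mL r ≠ 3 := fun h3 => h ⟨h3, rfl⟩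
    rcases mL_range r with h0 | h0 | h0 | h0 <;> simp_all [mstep]
  · by_cases hx2 : x = 2
    · subst hx2
      have h2 : mL (2 :: r) = if r.take 1 = [1] then 2 else 0 := by
        unfold mL; simp only [List.take]
        split_ifs <;> simp_all
      rw [h2]
      by_cases ht : r.take 1 = [1]
      · have : mL r = 1 := (mL_eq_one_iff r).mpr ht
        simp [this, mstep, ht]
      · have : mL r ≠ 1 := fun hc => ht ((mL_eq_one_iff r).mp hc)
        simp [mstep, ht, this]
    · by_cases hx3 : x = 3
      · subst hx3
        have h2 : mL (3 :: r) = if r.take 2 = [2, 1] then 3 else 0 := by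
          unfold mL; simp only [List.take]
          split_ifs <;> simp_all
        rw [h2]
        by_cases ht : r.take 2 = [2, 1]
        · have : mL r = 2 := (mL_eq_two_iff r).mpr ht
          simp [this, mstep, ht]
        · have : mL r ≠ 2 := fun hc => ht ((mL_eq_two_iff r).mp hc)
          simp [mstep, ht, this]
      · have h0 : mL (x :: r) = 0 := by
          unfold mL; simp only [List.take]
          split_ifs <;> simp_all
        rw [h0]
        simp [mstep, hx1, hx2, hx3]

lemma mstep_ne_four (q x : Int) (h : ¬ (q = 3 ∧ x = 1)) : mstep q x ≠ 4 := by
  unfold mstep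
  split_ifs <;> simp_all

-- head of the state stack is the match length, as long as no occurrence is inside s
lemma headI_stOf (s : List Int) (h : NoOcc s) : (stOf s).headI = mL s.reverse := by
  induction s using List.reverseRecOn with
  | nil => simp [stOf, mL]
  | append_singleton s x ih =>
      have hs : NoOcc s := fun hc => h (hc.trans ⟨[], [x], by simp⟩)
      rw [stOf_append, List.headI_cons, ih hs]
      have hnm : ¬ (mL s.reverse = 3 ∧ x = 1) := by
        rintro ⟨h3, rfl⟩
        obtain ⟨r', hr⟩ := (mL_three _).mp h3
        apply h
        refine ⟨r'.reverse, [], ?_⟩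
        have : s = r'.reverse ++ [1, 2, 3] := by
          have := congrArg List.reverse hr; simpa using this
        simp [this]
      rw [matchLen_cons _ _ hnm]
      simp

-- an occurrence in s ++ [x] is an occurrence in s or a suffix of s ++ [x]
lemma infix_append_singleton {P s : List Int} {x : Int} (h : P <:+: s ++ [x]) :
    P <:+: s ∨ ∃ t, s ++ [x] = t ++ P := by
  obtain ⟨u, v, huv⟩ := h
  rcases List.eq_nil_or_concat v with rfl | ⟨v', y, rfl⟩
  · exact Or.inr ⟨u, by simpa using huv.symm⟩
  · left
    have : s ++ [x] = (u ++ P ++ v') ++ [y] := by simpa using huv.symm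
    have h2 : s = u ++ P ++ v' := by
      have := congrArg List.reverse this; simp at this; simp [this.2]
    exact ⟨u, v', by simp [h2]⟩

lemma slice_neg4_eq (t : List Int) (x : Int) :
    PySem.List.slice (t ++ [1, 2, 3, x]) (some (-4)) none = [1, 2, 3, x] := by
  rw [PySem.List.slice_from_neg_ofNat _ 4 (by omega)]
  simp

lemma slice_to_neg4_eq (t : List Int) (x : Int) :
    PySem.List.slice (t ++ [1, 2, 3, x]) none (some (-4)) = t := by
  rw [PySem.List.slice_to_neg_ofNat _ 4 (by omega)]
  simp

-- the main loop invariant: starting from corresponding states, the counts agree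
lemma loop_corr (l : List Int) : ∀ (s : List Int) (cnt : Int), NoOcc s →
    (l.foldl solStepA (s, cnt)).2 = (l.foldl solStepB (stOf s, cnt)).2 := by
  induction l with
  | nil => intro s cnt _; rfl
  | cons x l ih =>
      intro s cnt hno
      simp only [List.foldl_cons]
      by_cases hm : mL s.reverse = 3 ∧ x = 1
      · -- match: A pops 4 ingredients, B pops 3 states
        obtain ⟨h3, rfl⟩ := hm
        obtain ⟨r', hr⟩ := (mL_three _).mp h3
        have hs : s = r'.reverse ++ [1, 2, 3] := by
          have := congrArg List.reverse hr; simpa using this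
        subst hs
        have hA : solStepA (r'.reverse ++ [1, 2, 3], cnt) 1
            = (r'.reverse, cnt + 1) := by
          simp only [solStepA]
          rw [show r'.reverse ++ [1, 2, 3] ++ [1] = r'.reverse ++ [1, 2, 3, 1] by simp]
          rw [slice_neg4_eq, slice_to_neg4_eq]
          simp
        have hB : solStepB (stOf (r'.reverse ++ [1, 2, 3]), cnt) 1
            = (stOf r'.reverse, cnt + 1) := by
          have hhead : (stOf (r'.reverse ++ [1, 2, 3])).headI = 3 := by
            rw [headI_stOf _ hno]; simpa using h3
          have hst : stOf (r'.reverse ++ [1, 2, 3])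
              = mstep (mstep (mstep (stOf r'.reverse).headI 1) 2) 3
                :: mstep (mstep (stOf r'.reverse).headI 1) 2
                :: mstep (stOf r'.reverse).headI 1 :: stOf r'.reverse := by
            rw [show r'.reverse ++ [1, 2, 3] = (r'.reverse ++ [1] ++ [2]) ++ [3] by simp,
                stOf_append, stOf_append, stOf_append]
            simp
          simp only [solStepB, hhead]
          rw [hst]
          norm_num [mstep]
        rw [hA, hB]
        have hno' : NoOcc r'.reverse := by
          intro hc
          exact hno (hc.trans ⟨[], [1, 2, 3], rfl⟩)
        exact ih _ _ hno'
      · -- no match: both push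
        have hhead : (stOf s).headI = mL s.reverse := headI_stOf s hno
        have hnq4 : mstep (mL s.reverse) x ≠ 4 := by
          apply mstep_ne_four; rintro ⟨h3, rfl⟩; exact hm ⟨h3, rfl⟩
        have hnoocc : NoOcc (s ++ [x]) := by
          intro hc
          rcases infix_append_singleton hc with h | ⟨t, ht⟩
          · exact hno h
          · -- suffix occurrence forces mL s.reverse = 3 ∧ x = 1
            have hx : x = 1 ∧ s = t ++ [1, 2, 3] := by
              have := congrArg List.reverse ht
              simp at this
              exact ⟨this.1, by
                have := this.2
                have h2 := congrArg List.reverse this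
                simpa using h2⟩
            apply hm
            refine ⟨?_, hx.1⟩
            rw [hx.2]
            rw [mL_three]
            exact ⟨t.reverse, by simp⟩
        have hA : solStepA (s, cnt) x = (s ++ [x], cnt) := by
          simp only [solStepA]
          have : PySem.List.slice (s ++ [x]) (some (-4)) none ≠ [1, 2, 3, 1] := by
            intro he
            apply hnoocc
            have hsuf : [1, 2, 3, 1] <:+ s ++ [x] := by
              rw [← he]
              rw [PySem.List.slice_from_neg_ofNat _ 4 (by omega)]
              exact List.drop_suffix _ _
            exact hsuf.isInfix
          simp [this]
        have hB : solStepB (stOf s, cnt) x = (stOf (s ++ [x]), cnt) := by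
          simp only [solStepB, hhead]
          rw [stOf_append, hhead]
          simp [hnq4]
        rw [hA, hB]
        exact ih _ _ hnoocc

-- ===== VERDICT (by name: the statement is the Claim_ definition above) =====
theorem solution_spec : Claim_equal_solution := by
  intro ingredient _
  unfold Spec_solution solution solution_alt
  have h := loop_corr ingredient [] 0 (by rintro ⟨u, v, h⟩; simp at h)
  simpa [stOf] using h
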